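-- pv_equiv track=rewrite | github.com/TBA5854/Cisco-Track-2 | main.py | find_missing_8021x_ports
-- ===== SOURCE A (Python) =====
-- def find_missing_8021x_ports(text):
--   missing_ports = []
--   current_interface = None
--   # text=[text]
--   for line in text:
--     if line.startswith("interface"):
--       current_interface = line.split()[1]
--     elif current_interface and line.startswith("shutdown"):
--       current_interface = None
--     elif current_interface and line.startswith("switchport mode access"):
--       if not any(line.lower() for line in text if "dot1x" in line.lower()):
--         missing_ports.append({
--           "interface": current_interface,
--           "description": "Missing 802.1x authentication"
--         })
--
--   return missing_ports
-- ===== SOURCE B (Python) =====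
-- def _blocks(lines):
--     # split the config into (interface-name, body-lines) blocks, dropping
--     # any lines before the first interface header
--     blocks = []
--     while lines:
--         head, lines = lines[0], lines[1:]
--         if head.startswith("interface"):
--             body = []
--             while lines and not lines[0].startswith("interface"):
--                 body.append(lines[0])
--                 lines = lines[1:]
--             blocks.append((head.split()[1], body))
--     return blocks
--
--
-- def _block_hits(name, body):
--     # report each 'switchport mode access' line before the first 'shutdown'
--     hits = []
--     for line in body:
--         if line.startswith("shutdown"):
--             break
--         if line.startswith("switchport mode access"):
--             hits.append({"interface": name,
--                          "description": "Missing 802.1x authentication"})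
--     return hits
--
--
-- def find_missing_8021x_ports(text):
--     if any("dot1x" in line.lower() for line in text):
--         return []
--     out = []
--     for name, body in _blocks(text):
--         out += _block_hits(name, body)
--     return out
-- ===== Notes on version B (the rewrite author's own statement) =====
-- stated objective: alternative
-- what changed: A is a single-pass state machine tracking the current interface and re-scanning the whole config for 'dot1x' at every match; B checks for a dot1x line once up front (returning [] immediately if found), then explicitly splits the config into interface blocks and scans each block's body only up to its first 'shutdown' line.
import Mathlib
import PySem

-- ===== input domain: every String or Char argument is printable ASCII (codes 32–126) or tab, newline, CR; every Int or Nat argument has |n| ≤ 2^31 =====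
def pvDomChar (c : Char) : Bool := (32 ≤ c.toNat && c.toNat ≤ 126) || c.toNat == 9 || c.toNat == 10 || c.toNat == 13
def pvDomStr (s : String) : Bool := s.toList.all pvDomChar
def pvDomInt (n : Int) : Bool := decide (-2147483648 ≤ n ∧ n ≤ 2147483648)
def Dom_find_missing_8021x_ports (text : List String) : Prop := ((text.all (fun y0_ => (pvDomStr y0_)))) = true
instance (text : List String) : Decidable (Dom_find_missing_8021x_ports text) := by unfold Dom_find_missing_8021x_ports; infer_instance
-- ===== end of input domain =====

-- B replaces A's single-pass state machine (which re-scans the whole config for 'dot1x'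
-- at every hit) by one up-front dot1x check with early return, then an explicit split
-- into interface blocks scanned up to their first 'shutdown' line.

-- ===== PORT A =====
-- shared line predicates (the same startswith tests both Pythons perform)
def pvHdr (l : String) : Bool := PySem.Str.startswith l "interface"
def pvShut (l : String) : Bool := PySem.Str.startswith l "shutdown"
def pvSw (l : String) : Bool := PySem.Str.startswith l "switchport mode access"
-- line.split()[1]; the IndexError case (fewer than 2 tokens) is excluded by Pre_, "" is a dummy there
def pvName (l : String) : String := PySem.List.pyGetD (PySem.Str.split₀ l) 1 ""
def pvEntry (name : String) : List (String × String) :=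
  [("interface", name), ("description", "Missing 802.1x authentication")]
-- A's `any(line.lower() for line in text if "dot1x" in line.lower())`: the generator
-- filters on the substring test and truth-tests line.lower() (nonempty string = True)
def pvDot1xA (text : List String) : Bool :=
  text.any (fun l => PySem.Str.isIn "dot1x" (PySem.Str.lower l) && !(PySem.Str.lower l).toList.isEmpty)

-- loop body of A; `current_interface and …` truthiness is `isSome` here: names produced by
-- split() are never empty strings (Pre_ guards the only other source, the "" dummy)
def pvStepA (text : List String) (st : List (List (String × String)) × Option String) (line : String) :
    List (List (String × String)) × Option String :=
  if pvHdr line then (st.1, some (pvName line))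
  else if st.2.isSome && pvShut line then (st.1, none)
  else if st.2.isSome && pvSw line then
    (if !pvDot1xA text then st.1 ++ [pvEntry (st.2.getD "")] else st.1, st.2)
  else st

def find_missing_8021x_ports (text : List String) : List (List (String × String)) :=
  (text.foldl (pvStepA text) ([], none)).1

-- ===== PORT B =====
-- Source B's _blocks: outer while pops lines; on a header, the inner while collects the body
-- (takeWhile) and advances past it (dropWhile)
def pvBlocks : List String → List (String × List String)
  | [] => []
  | l :: rest =>
    if pvHdr l then
      (pvName l, rest.takeWhile (fun x => !pvHdr x)) :: pvBlocks (rest.dropWhile (fun x => !pvHdr x))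
    else pvBlocks rest
termination_by ls => ls.length
decreasing_by
  · have := List.length_dropWhile_le (fun x => !pvHdr x) rest
    simp; omega
  · simp

-- Source B's _block_hits: scan the body, break at 'shutdown', record each access-mode line
def pvBlockHits (name : String) : List String → List (List (String × String))
  | [] => []
  | l :: rest =>
    if pvShut l then []
    else if pvSw l then pvEntry name :: pvBlockHits name rest
    else pvBlockHits name rest

def find_missing_8021x_ports_alt (text : List String) : List (List (String × String)) :=
  if text.any (fun l => PySem.Str.isIn "dot1x" (PySem.Str.lower l)) then []
  else (pvBlocks text).foldl (fun out b => out ++ pvBlockHits b.1 b.2) []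

-- ===== PRECONDITION & SPEC =====
-- Pre_ excludes exactly the inputs where Python's `line.split()[1]` raises IndexError:
-- a line starting with "interface" that has fewer than two whitespace-separated tokens.
def Pre_find_missing_8021x_ports (text : List String) : Prop :=
  ∀ l ∈ text, PySem.Str.startswith l "interface" = true → 2 ≤ (PySem.Str.split₀ l).length
instance (text : List String) : Decidable (Pre_find_missing_8021x_ports text) := by
  unfold Pre_find_missing_8021x_ports; infer_instance

def pvWitness_find_missing_8021x_ports : List String :=
  ["interface Gi0/1", "switchport mode access", "shutdown", "switchport mode access"]

def Spec_find_missing_8021x_ports (text : List String) (out : List (List (String × String))) : Prop :=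
  out = find_missing_8021x_ports_alt text
instance (text : List String) (out : List (List (String × String))) : Decidable (Spec_find_missing_8021x_ports text out) := by
  unfold Spec_find_missing_8021x_ports; infer_instance

-- ===== CLAIM (what is proved, stated in full; the proofs are below) =====
def Claim_equal_find_missing_8021x_ports : Prop :=
  ∀ (text : List String), Dom_find_missing_8021x_ports text →
    Pre_find_missing_8021x_ports text →
    Spec_find_missing_8021x_ports text (find_missing_8021x_ports text)

-- ===== LEMMAS AND PROOFS =====

-- a line containing "dot1x" is nonempty, so A's truth-test in the generator is redundant
lemma pvDot1x_elt (l : String) :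
    (PySem.Str.isIn "dot1x" (PySem.Str.lower l) && !(PySem.Str.lower l).toList.isEmpty)
      = PySem.Str.isIn "dot1x" (PySem.Str.lower l) := by
  by_cases h : PySem.Str.isIn "dot1x" (PySem.Str.lower l) = true
  · have hinf := (PySem.Str.isIn_iff_infix ..).mp h
    have hne : PySem.Chars.lower l.toList ≠ [] := by
      intro he
      have h2 : (PySem.Str.lower l).toList = [] := by simp [he]
      rw [h2] at hinf
      have := List.IsInfix.sublist hinf
      simp at this
    simp [hne]
  · simp at h
    simp [h]

lemma pvDot1xA_eq (text : List String) :
    pvDot1xA text = text.any (fun l => PySem.Str.isIn "dot1x" (PySem.Str.lower l)) := by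
  unfold pvDot1xA
  simp only [pvDot1x_elt]

-- when a dot1x line exists, A's loop never appends
lemma pvFoldA_dot1x (text : List String) (h : pvDot1xA text = true) :
    ∀ (ls : List String) (acc : List (List (String × String))) (cur : Option String),
      (ls.foldl (pvStepA text) (acc, cur)).1 = acc := by
  intro ls
  induction ls with
  | nil => intro acc cur; rfl
  | cons l rest ih =>
    intro acc cur
    have hstep : ∃ c, pvStepA text (acc, cur) l = (acc, c) := by
      unfold pvStepA
      split_ifs <;> simp_all
    obtain ⟨c, hc⟩ := hstep
    simp only [List.foldl_cons, hc]
    exact ih acc c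

-- A's loop as a structural recursion over the remaining lines and current interface
def pvConsume : Option String → List String → List (List (String × String))
  | _, [] => []
  | cur, l :: rest =>
    if pvHdr l then pvConsume (some (pvName l)) rest
    else if cur.isSome && pvShut l then pvConsume none rest
    else if cur.isSome && pvSw l then pvEntry (cur.getD "") :: pvConsume cur rest
    else pvConsume cur rest

lemma pvFoldA_consume (text : List String) (h : pvDot1xA text = false) :
    ∀ (ls : List String) (acc : List (List (String × String))) (cur : Option String),
      (ls.foldl (pvStepA text) (acc, cur)).1 = acc ++ pvConsume cur ls := by
  intro ls
  induction ls with
  | nil => intro acc cur; simp [pvConsume]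
  | cons l rest ih =>
    intro acc cur
    simp only [List.foldl_cons]
    by_cases h1 : pvHdr l
    · have hst : pvStepA text (acc, cur) l = (acc, some (pvName l)) := by
        simp [pvStepA, h1]
      rw [hst, ih]
      simp [pvConsume, h1]
    · by_cases h2 : (cur.isSome && pvShut l) = true
      · have hst : pvStepA text (acc, cur) l = (acc, none) := by
          simp [pvStepA, h1, h2]
        rw [hst, ih]
        simp [pvConsume, h1, h2]
      · by_cases h3 : (cur.isSome && pvSw l) = true
        · have hst : pvStepA text (acc, cur) l = (acc ++ [pvEntry (cur.getD "")], cur) := by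
            simp [pvStepA, h1, h2, h3, h]
          rw [hst, ih]
          simp [pvConsume, h1, h2, h3]
        · have hst : pvStepA text (acc, cur) l = (acc, cur) := by
            simp [pvStepA, h1, h2, h3]
          rw [hst, ih]
          simp [pvConsume, h1, h2, h3]

-- pvBlocks ignores leading non-header lines
lemma pvBlocks_dropWhile : ∀ ls : List String,
    pvBlocks (ls.dropWhile (fun x => !pvHdr x)) = pvBlocks ls := by
  intro ls
  induction ls with
  | nil => rfl
  | cons l rest ih =>
    by_cases h : pvHdr l
    · simp [h]
    · rw [List.dropWhile_cons]
      simp only [h, Bool.not_false, if_pos]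
      rw [ih]
      conv_rhs => rw [pvBlocks]
      simp [h]

-- the state machine agrees with the block decomposition
lemma pvConsume_blocks : ∀ ls : List String,
    pvConsume none ls = (pvBlocks ls).flatMap (fun b => pvBlockHits b.1 b.2) ∧
    ∀ name, pvConsume (some name) ls
      = pvBlockHits name (ls.takeWhile (fun x => !pvHdr x))
        ++ (pvBlocks (ls.dropWhile (fun x => !pvHdr x))).flatMap (fun b => pvBlockHits b.1 b.2) := by
  intro ls
  induction ls with
  | nil => exact ⟨by simp [pvConsume, pvBlocks], fun name => by simp [pvConsume, pvBlockHits, pvBlocks]⟩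
  | cons l rest ih =>
    obtain ⟨ih1, ih2⟩ := ih
    by_cases h1 : pvHdr l
    · constructor
      · simp [pvConsume, pvBlocks, h1, ih2]
      · intro name
        simp [pvConsume, pvBlocks, pvBlockHits, h1, ih2]
    · refine ⟨by simp [pvConsume, pvBlocks, h1, ih1], fun name => ?_⟩
      by_cases h2 : pvShut l
      · simp [pvConsume, pvBlockHits, h1, h2, ih1, pvBlocks_dropWhile]
      · by_cases h3 : pvSw l
        · simp [pvConsume, pvBlockHits, h1, h2, h3, ih2]
        · simp [pvConsume, pvBlockHits, h1, h2, h3, ih2]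

-- ===== VERDICT (by name: the statement is the Claim_ definition above) =====
theorem find_missing_8021x_ports_spec : Claim_equal_find_missing_8021x_ports := by
  intro text _ _
  unfold Spec_find_missing_8021x_ports find_missing_8021x_ports find_missing_8021x_ports_alt
  by_cases hd : text.any (fun l => PySem.Str.isIn "dot1x" (PySem.Str.lower l)) = true
  · have hA : pvDot1xA text = true := by rw [pvDot1xA_eq]; exact hd
    simp only [hd, if_pos]
    exact pvFoldA_dot1x text hA text [] none
  · have hA : pvDot1xA text = false := by rw [pvDot1xA_eq]; simpa using hd
    simp only [hd, Bool.false_eq_true, reduceIte]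
    rw [pvFoldA_consume text hA text [] none, (pvConsume_blocks text).1,
      PySem.List.foldl_append_eq_flatMap]
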